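-- pv_equiv track=rewrite | github.com/hamzamohtaramelalaoui/Failed_skibidus_test | Skibidus/deep_test.py | skuld
-- ===== SOURCE A (Python) =====
-- def build_dict(input_string):
--     """
--     Builds a dictionary of roots and children for the input string.
--     Each root is a character index, and its children are subsequent indices.
--     """
--     return [
--         {'root': str(i), 'children': [str(j) for j in range(i + 1, len(input_string))]}
--         for i in range(len(input_string))
--     ]
--
-- def skuld(input_string):
--     """
--     Generates a list of substrings based on the input string.
--     """
--     my_names = build_dict(input_string)
--     substring_list = []
--     for name in my_names:
--         root = name['root']
--         for child in name['children']:
--             substring_list.append(f"{root},{child}")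
--     return ultima(my_names, substring_list)
--
-- def ultima(my_names, substring_list):
--     """
--     Processes the list of substrings to append children to the last part of each substring.
--     """
--     last = my_names[-1]
--     new_substrings = []
--     for l in substring_list:
--         last_part = l.rsplit(",", 1)[-1]
--         if last_part == last['root']:
--             new_substrings.append(l)
--         else:
--             for name in my_names:
--                 if last_part == name['root']:
--                     for child in name['children']:
--                         new_substrings.append(f"{l},{child}")
--                     break
--     return clean_list(new_substrings)
--
-- def clean_list(substring_list):
--     """
--     Filters out substrings that start with '0' and removes redundant substrings.
--     """
--     filtered_list = [l for l in substring_list if l[0] == '0']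
--     return ultima_clean(filtered_list)
--
-- def ultima_clean(substring_list):
--     """
--     Removes substrings that are contained within other substrings.
--     """
--     to_delete = set()
--     for i in range(len(substring_list)):
--         for j in range(len(substring_list)):
--             if i != j and substring_list[i] in substring_list[j]:
--                 to_delete.add(substring_list[i])
--     return [l for l in substring_list if l not in to_delete]
-- ===== SOURCE B (Python) =====
-- def skuld(input_string):
--     """
--     Direct construction: only chains rooted at index 0 survive A's filter, so
--     build exactly those candidate strings (triples j,k with 1 <= j < k <= n-1,
--     then the pair for n-1), and drop every candidate that occurs as a proper
--     substring of another one, via one precomputed set of all proper substrings.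
--     """
--     n = len(input_string)
--     cands = ["0,%d,%d" % (j, k) for j in range(1, n - 1) for k in range(j + 1, n)]
--     if n >= 2:
--         cands.append("0,%d" % (n - 1))
--     contained = {t[a:b] for t in cands
--                  for a in range(len(t))
--                  for b in range(a + 1, len(t))}
--     # t[a:b] with b < len(t) plus the tails t[a:] with a > 0 cover all proper substrings
--     contained.update(t[a:] for t in cands for a in range(1, len(t)))
--     return [s for s in cands if s not in contained]
-- ===== Notes on version B (the rewrite author's own statement) =====
-- stated objective: faster
-- what changed: B skips A's dict list, per-pair linear root scan and cubic expansion of roots other than index 0 by generating only the surviving zero-rooted candidate strings directly from index arithmetic, and replaces the all-pairs substring-containment test by one precomputed set of all proper substrings of the candidates.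
-- crash fix: A raises IndexError on the empty string (my_names[-1] on an empty list); B returns []. — e.g. on skuld(""): A raises IndexError, B returns []
import Mathlib
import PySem

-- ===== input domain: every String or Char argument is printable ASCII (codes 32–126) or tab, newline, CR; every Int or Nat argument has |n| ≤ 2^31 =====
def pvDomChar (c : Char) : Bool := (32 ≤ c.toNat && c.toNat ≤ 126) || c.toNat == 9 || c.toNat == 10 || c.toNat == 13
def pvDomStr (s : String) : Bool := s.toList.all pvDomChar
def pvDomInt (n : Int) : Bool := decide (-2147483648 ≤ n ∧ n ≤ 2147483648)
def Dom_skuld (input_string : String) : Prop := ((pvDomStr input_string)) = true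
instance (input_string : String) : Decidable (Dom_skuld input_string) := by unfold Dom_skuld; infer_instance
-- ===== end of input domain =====

-- B replaces A's dict list, per-pair root scan and cubic expansion by direct index
-- arithmetic over the surviving zero-rooted candidates, and the all-pairs containment
-- test by one precomputed set of proper substrings (objective: faster, measured).
-- Both ports compute Python's strings as `List Char` (PySem.Chars style) and wrap
-- with String.ofList only at the end.

-- ===== PORT A =====
structure SkName where
  root : List Char
  children : List (List Char)

def skBuildDict (input_string : String) : List SkName :=
  (PySem.List.pyRange 0 (PySem.Str.len input_string) 1).map (fun i =>
    { root := PySem.Int.toChars i,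
      children := (PySem.List.pyRange (i + 1) (PySem.Str.len input_string) 1).map
        (fun j => PySem.Int.toChars j) })

-- hand port of l.rsplit(",", 1)[-1]: the segment after the LAST ',' (l itself if no ','); exact
def skRsplitLast (l : List Char) : List Char :=
  (l.reverse.takeWhile (fun c => c ≠ ',')).reverse

-- the inner for-loop of ultima with its break: first name whose root matches last_part
def skScan (l : List Char) (lastPart : List Char) : List SkName → List (List Char)
  | [] => []
  | nm :: rest =>
    if lastPart = nm.root then nm.children.map (fun child => l ++ ',' :: child)
    else skScan l lastPart rest

def skUltimaClean (substring_list : List (List Char)) : List (List Char) :=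
  substring_list.filter (fun l =>
    !(((PySem.List.pyRange 0 (PySem.List.len substring_list) 1).foldl (fun td i =>
      (PySem.List.pyRange 0 (PySem.List.len substring_list) 1).foldl (fun td j =>
        if i ≠ j ∧ PySem.Chars.isIn (PySem.List.pyGetD substring_list i [])
            (PySem.List.pyGetD substring_list j []) = true
        then td.add (PySem.List.pyGetD substring_list i []) else td) td)
      PySem.Set.empty).contains l))

-- Python's l[0] comparison against the zero digit: the scanned strings are never
-- empty on inputs reached from skuld, so pyGet? is exact here
def skCleanList (substring_list : List (List Char)) : List (List Char) :=
  skUltimaClean (substring_list.filter (fun l => PySem.List.pyGet? l 0 == some '0'))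

def skUltima (my_names : List SkName) (substring_list : List (List Char)) : List (List Char) :=
  (PySem.List.pyGet? my_names (-1)).elim
    []   -- Python raises IndexError here (my_names[-1]); excluded by Pre_skuld
    (fun last =>
      skCleanList (substring_list.foldl (fun acc l =>
        if skRsplitLast l = last.root then acc ++ [l]
        else acc ++ skScan l (skRsplitLast l) my_names) []))

def skuld (input_string : String) : List String :=
  (skUltima (skBuildDict input_string)
    ((skBuildDict input_string).foldl (fun acc name =>
      acc ++ name.children.map (fun child => name.root ++ ',' :: child)) [])).map
    String.ofList

-- ===== PORT B =====
def skbCands (n : Int) : List (List Char) :=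
  if 2 ≤ n then
    ((PySem.List.pyRange 1 (n - 1) 1).foldl (fun acc j =>
      acc ++ (PySem.List.pyRange (j + 1) n 1).map (fun k =>
        '0' :: ',' :: (PySem.Int.toChars j ++ ',' :: PySem.Int.toChars k))) []) ++
      ['0' :: ',' :: PySem.Int.toChars (n - 1)]
  else
    (PySem.List.pyRange 1 (n - 1) 1).foldl (fun acc j =>
      acc ++ (PySem.List.pyRange (j + 1) n 1).map (fun k =>
        '0' :: ',' :: (PySem.Int.toChars j ++ ',' :: PySem.Int.toChars k))) []

def skbContained (cands : List (List Char)) : PySem.Set (List Char) :=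
  cands.foldl (fun st t =>
    (PySem.List.pyRange 1 (PySem.List.len t) 1).foldl (fun st a =>
      st.add (PySem.List.slice t (some a) none)) st)
    (cands.foldl (fun st t =>
      (PySem.List.pyRange 0 (PySem.List.len t) 1).foldl (fun st a =>
        (PySem.List.pyRange (a + 1) (PySem.List.len t) 1).foldl (fun st b =>
          st.add (PySem.List.slice t (some a) (some b))) st) st) PySem.Set.empty)

def skuld_alt (input_string : String) : List String :=
  (((skbCands (PySem.Str.len input_string)).filter (fun s =>
    !((skbContained (skbCands (PySem.Str.len input_string))).contains s))).map
    String.ofList)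

-- ===== PRECONDITION & SPEC =====
-- Pre_ excludes only the empty string, on which A raises IndexError (my_names[-1]).
def Pre_skuld (input_string : String) : Prop := input_string ≠ ""
instance (input_string : String) : Decidable (Pre_skuld input_string) := by
  unfold Pre_skuld; infer_instance
def pvWitness_skuld : String := "ab"

-- A raises IndexError on the empty string (my_names[-1] on an empty list); B returns [].
def Raises_skuld (input_string : String) : Prop := input_string = ""
instance (input_string : String) : Decidable (Raises_skuld input_string) := by
  unfold Raises_skuld; infer_instance
def pvRaiseWitness_skuld : String := ""
def pvRaiseWitnessOut_skuld : List String := []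

def Spec_skuld (input_string : String) (out : List String) : Prop := out = skuld_alt input_string
instance (input_string : String) (out : List String) : Decidable (Spec_skuld input_string out) := by
  unfold Spec_skuld; infer_instance

-- ===== CLAIM (what is proved, stated in full; the proofs are below) =====
def Claim_equal_skuld : Prop := ∀ (input_string : String), Dom_skuld input_string →
  Pre_skuld input_string → Spec_skuld input_string (skuld input_string)
def Claim_raises_skuld : Prop :=
  (∀ (input_string : String), Dom_skuld input_string → Raises_skuld input_string →
    ¬ Pre_skuld input_string) ∧
  (Dom_skuld (pvRaiseWitness_skuld) ∧ Raises_skuld (pvRaiseWitness_skuld) ∧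
    skuld_alt (pvRaiseWitness_skuld) = pvRaiseWitnessOut_skuld)

-- ===== LEMMAS AND PROOFS =====

-- ---- decimal digits: Nat.toDigits 10 characterized by a simple recursion ----
def myDigits (n : Nat) : List Char :=
  if n < 10 then [Nat.digitChar n] else myDigits (n / 10) ++ [Nat.digitChar (n % 10)]
decreasing_by exact Nat.div_lt_self (by omega) (by omega)

lemma toDigitsCore_eq_myDigits : ∀ (f n : Nat) (ds : List Char), 0 < f → n < 10 ^ f →
    Nat.toDigitsCore 10 f n ds = myDigits n ++ ds := by
  intro f
  induction f with
  | zero => omega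
  | succ f ih =>
    intro n ds _ hn
    rw [Nat.toDigitsCore]
    by_cases h10 : n < 10
    · have : n / 10 = 0 := Nat.div_eq_of_lt h10
      simp only [this]
      rw [myDigits]
      simp [h10, Nat.mod_eq_of_lt h10]
    · have hne : n / 10 ≠ 0 := by
        intro h; exact h10 (by omega)
      simp only [if_neg hne]
      have hf : 0 < f := by
        rcases Nat.eq_zero_or_pos f with h | h
        · subst h; simp at hn; omega
        · exact h
      have hlt : n / 10 < 10 ^ f := by
        rw [pow_succ] at hn
        exact (Nat.div_lt_iff_lt_mul (by omega)).mpr hn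
      rw [ih (n / 10) _ hf hlt]
      conv_rhs => rw [myDigits]
      simp [h10, List.append_assoc]

lemma toDigits_eq_myDigits (m : Nat) : Nat.toDigits 10 m = myDigits m := by
  unfold Nat.toDigits
  have hm : m < 10 ^ (m + 1) :=
    lt_of_lt_of_le (Nat.lt_pow_self (by omega)) (Nat.pow_le_pow_right (by omega) (by omega))
  rw [toDigitsCore_eq_myDigits (m+1) m [] (by omega) hm, List.append_nil]

lemma toChars_natCast (m : Nat) : PySem.Int.toChars (m : Int) = myDigits m := by
  have h1 : ¬ ((m : Int) < 0) := by omega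
  simp only [PySem.Int.toChars, if_neg h1, Int.toNat_natCast]
  exact toDigits_eq_myDigits m

lemma valL_myDigits (n : Nat) :
    (myDigits n).foldl (fun a c => 10 * a + (c.toNat - 48)) 0 = n := by
  induction n using Nat.strong_induction_on with
  | _ n ih =>
    rw [myDigits]
    by_cases h : n < 10
    · simp only [if_pos h, List.foldl]
      have : ∀ m, m < 10 → (Nat.digitChar m).toNat - 48 = m := by decide
      rw [this n h]; omega
    · simp only [if_neg h, List.foldl_append, List.foldl]
      rw [ih (n / 10) (Nat.div_lt_self (by omega) (by omega))]
      have : ∀ m, m < 10 → (Nat.digitChar m).toNat - 48 = m := by decide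
      rw [this (n % 10) (Nat.mod_lt _ (by omega))]
      omega

lemma myDigits_inj {a b : Nat} (h : myDigits a = myDigits b) : a = b := by
  have := valL_myDigits a
  rw [h, valL_myDigits b] at this
  omega

lemma comma_not_mem_myDigits (n : Nat) : ',' ∉ myDigits n := by
  induction n using Nat.strong_induction_on with
  | _ n ih =>
    rw [myDigits]
    by_cases h : n < 10
    · simp only [if_pos h, List.mem_singleton]
      have : ∀ m, m < 10 → Nat.digitChar m ≠ ',' := by decide
      exact fun hc => this n h hc.symm
    · simp only [if_neg h, List.mem_append, List.mem_singleton]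
      rintro (hc | hc)
      · exact ih (n / 10) (Nat.div_lt_self (by omega) (by omega)) hc
      · have : ∀ m, m < 10 → Nat.digitChar m ≠ ',' := by decide
        exact this (n % 10) (Nat.mod_lt _ (by omega)) hc.symm

lemma myDigits_ne_nil (n : Nat) : myDigits n ≠ [] := by
  rw [myDigits]
  by_cases h : n < 10 <;> simp [h]

lemma head?_myDigits_zero_iff (n : Nat) : (myDigits n).head? = some '0' ↔ n = 0 := by
  induction n using Nat.strong_induction_on with
  | _ n ih =>
    rw [myDigits]
    by_cases h : n < 10
    · simp only [if_pos h, List.head?]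
      constructor
      · intro hc
        have hd : ∀ m, m < 10 → (Nat.digitChar m = '0' ↔ m = 0) := by decide
        exact (hd n h).mp (by simpa using hc)
      · intro hc; subst hc; rfl
    · simp only [if_neg h]
      rw [List.head?_append_of_ne_nil _ (myDigits_ne_nil _)]
      rw [ih (n / 10) (Nat.div_lt_self (by omega) (by omega))]
      omega

lemma toChars_inj {i j : Int} (hi : 0 ≤ i) (hj : 0 ≤ j)
    (h : PySem.Int.toChars i = PySem.Int.toChars j) : i = j := by
  rw [show i = ((i.toNat : Nat) : Int) by omega, show j = ((j.toNat : Nat) : Int) by omega,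
    toChars_natCast, toChars_natCast] at h
  have := myDigits_inj h
  omega

lemma comma_not_mem_toChars {i : Int} (hi : 0 ≤ i) : ',' ∉ PySem.Int.toChars i := by
  rw [show i = ((i.toNat : Nat) : Int) by omega, toChars_natCast]
  exact comma_not_mem_myDigits _

lemma toChars_ne_nil (i : Int) : PySem.Int.toChars i ≠ [] := by
  unfold PySem.Int.toChars
  by_cases h : i < 0
  · simp [h]
  · simp only [if_neg h]
    rw [toDigits_eq_myDigits]
    exact myDigits_ne_nil _

lemma head?_toChars_zero_iff {i : Int} (hi : 0 ≤ i) :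
    (PySem.Int.toChars i).head? = some '0' ↔ i = 0 := by
  rw [show i = ((i.toNat : Nat) : Int) by omega, toChars_natCast, head?_myDigits_zero_iff]
  omega

lemma toChars_zero : PySem.Int.toChars 0 = ['0'] := by decide

-- ---- splitting a one-sided comma-free concatenation ----
lemma comma_append_inj {a a' b b' : List Char} (ha : ',' ∉ a) (ha' : ',' ∉ a')
    (h : a ++ ',' :: b = a' ++ ',' :: b') : a = a' ∧ b = b' := by
  induction a generalizing a' with
  | nil =>
    cases a' with
    | nil => simpa using h
    | cons x t =>
      simp only [List.nil_append, List.cons_append, List.cons.injEq] at h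
      exact absurd (h.1 ▸ List.mem_cons_self) ha'
  | cons x t ih =>
    cases a' with
    | nil =>
      simp only [List.cons_append, List.nil_append, List.cons.injEq] at h
      exact absurd (h.1.symm ▸ List.mem_cons_self) ha
    | cons y t' =>
      simp only [List.cons_append, List.cons.injEq] at h
      obtain ⟨h1, h2⟩ := ih (fun hm => ha (List.mem_cons_of_mem _ hm))
        (fun hm => ha' (List.mem_cons_of_mem _ hm)) h.2
      exact ⟨by rw [h.1, h1], h2⟩

lemma skRsplitLast_append {a b : List Char} (hb : ',' ∉ b) :
    skRsplitLast (a ++ ',' :: b) = b := by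
  unfold skRsplitLast
  rw [List.reverse_append, List.reverse_cons, List.append_assoc, List.singleton_append]
  have hall : b.reverse.takeWhile (fun c => decide (c ≠ ',')) = b.reverse :=
    List.takeWhile_eq_self_iff.mpr (fun c hc => by
      simp only [decide_eq_true_iff]
      exact fun hcc => hb (by simpa [hcc] using List.mem_reverse.mp hc))
  rw [List.takeWhile_append, if_pos (by rw [hall])]
  have : (',' :: a.reverse).takeWhile (fun c => decide (c ≠ ',')) = [] := by simp
  rw [this, List.append_nil, List.reverse_reverse]

-- ---- generic membership in a fold that only adds ----
lemma mem_foldl_set {ι : Type} (l : List ι)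
    (F : PySem.Set (List Char) → ι → PySem.Set (List Char)) (Q : ι → List Char → Prop)
    (hF : ∀ st x y, y ∈ F st x ↔ y ∈ st ∨ Q x y) (init : PySem.Set (List Char))
    (y : List Char) : y ∈ l.foldl F init ↔ y ∈ init ∨ ∃ x ∈ l, Q x y := by
  induction l generalizing init with
  | nil => simp
  | cons x t ih =>
    rw [List.foldl_cons, ih, hF]
    constructor
    · rintro (⟨h | h⟩ | ⟨z, hz, hQ⟩)
      · exact Or.inl h
      · exact Or.inr ⟨x, List.mem_cons_self, h⟩
      · exact Or.inr ⟨z, List.mem_cons_of_mem _ hz, hQ⟩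
    · rintro (h | ⟨z, hz, hQ⟩)
      · exact Or.inl (Or.inl h)
      · rcases List.mem_cons.mp hz with rfl | hz
        · exact Or.inl (Or.inr hQ)
        · exact Or.inr ⟨z, hz, hQ⟩

-- ---- proper nonempty infixes are exactly B's slices ----
lemma proper_infix_iff_slices {s t : List Char} (hs : s ≠ []) :
    (s <:+: t ∧ s ≠ t) ↔
      ((∃ a b : Nat, a < t.length ∧ a < b ∧ b < t.length ∧ s = (t.drop a).take (b - a)) ∨
       (∃ a : Nat, 1 ≤ a ∧ a < t.length ∧ s = t.drop a)) := by
  constructor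
  · rintro ⟨⟨pre, suf, rfl⟩, hne⟩
    have hslen : 0 < s.length := List.length_pos_iff.mpr hs
    cases suf with
    | nil =>
      refine Or.inr ⟨pre.length, ?_, ?_, ?_⟩
      · rcases List.eq_nil_or_concat pre with rfl | _
        · simp at hne
        · have : pre ≠ [] := by rintro rfl; simp at hne
          have := List.length_pos_iff.mpr this
          omega
      · simp only [List.length_append]; omega
      · simp
    | cons c suf' =>
      refine Or.inl ⟨pre.length, pre.length + s.length,
        by simp only [List.length_append, List.length_cons]; omega, by omega,
        by simp only [List.length_append, List.length_cons]; omega, ?_⟩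
      · have h1 : pre.length + s.length - pre.length = s.length := by omega
        rw [h1, List.append_assoc, List.drop_left, List.take_left]
  · rintro (⟨a, b, ha, hab, hb, rfl⟩ | ⟨a, ha1, ha, rfl⟩)
    · constructor
      · exact List.infix_iff_prefix_suffix.mpr ⟨t.drop a, List.take_prefix _ _, List.drop_suffix _ _⟩
      · intro heq
        have := congrArg List.length heq
        simp only [List.length_take, List.length_drop] at this
        omega
    · constructor
      · exact (List.drop_suffix _ _).isInfix
      · intro heq
        have := congrArg List.length heq
        simp only [List.length_drop] at this
        omega

-- ---- the two dedup stages agree on duplicate-free lists of nonempty strings ----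
lemma mem_cond_add_fold {ι : Type} (l : List ι) (P : ι → Prop) [DecidablePred P]
    (v : ι → List Char) (st : PySem.Set (List Char)) (y : List Char) :
    y ∈ l.foldl (fun td x => if P x then td.add (v x) else td) st ↔
      y ∈ st ∨ ∃ x ∈ l, P x ∧ y = v x := by
  refine mem_foldl_set l _ (fun x y => P x ∧ y = v x) ?_ st y
  intro st x y
  by_cases h : P x
  · rw [if_pos h, PySem.Set.mem_add]
    tauto
  · rw [if_neg h]
    tauto

lemma mem_add_fold {ι : Type} (l : List ι) (v : ι → List Char)
    (st : PySem.Set (List Char)) (y : List Char) :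
    y ∈ l.foldl (fun td x => td.add (v x)) st ↔ y ∈ st ∨ ∃ x ∈ l, y = v x := by
  refine mem_foldl_set l _ (fun x y => y = v x) ?_ st y
  intro st x y
  rw [PySem.Set.mem_add]

lemma mem_skbContained (xs : List (List Char)) (y : List Char) :
    y ∈ skbContained xs ↔
      ∃ t ∈ xs,
        ((∃ a ∈ PySem.List.pyRange 0 (PySem.List.len t) 1,
            ∃ b ∈ PySem.List.pyRange (a + 1) (PySem.List.len t) 1,
              y = PySem.List.slice t (some a) (some b)) ∨
         (∃ a ∈ PySem.List.pyRange 1 (PySem.List.len t) 1,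
            y = PySem.List.slice t (some a) none)) := by
  unfold skbContained
  rw [mem_foldl_set _ _ (fun t y => ∃ a ∈ PySem.List.pyRange 1 (PySem.List.len t) 1,
        y = PySem.List.slice t (some a) none)
      (fun st t y => mem_add_fold _ _ st y)]
  rw [mem_foldl_set _ _ (fun t y => ∃ a ∈ PySem.List.pyRange 0 (PySem.List.len t) 1,
        ∃ b ∈ PySem.List.pyRange (a + 1) (PySem.List.len t) 1,
          y = PySem.List.slice t (some a) (some b))
      (fun st t y => by
        rw [mem_foldl_set _ _ (fun a y => ∃ b ∈ PySem.List.pyRange (a + 1) (PySem.List.len t) 1,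
              y = PySem.List.slice t (some a) (some b))
            (fun st a y => mem_add_fold _ _ st y)])]
  have hemp : y ∈ (PySem.Set.empty : PySem.Set (List Char)) ↔ False := by
    rw [PySem.Set.empty_eq]
    simp
  rw [hemp]
  constructor
  · rintro ((h | ⟨t, ht, hc⟩) | ⟨t, ht, hc⟩)
    · exact absurd h id
    · exact ⟨t, ht, Or.inl hc⟩
    · exact ⟨t, ht, Or.inr hc⟩
  · rintro ⟨t, ht, hc | hc⟩
    · exact Or.inl (Or.inr ⟨t, ht, hc⟩)
    · exact Or.inr ⟨t, ht, hc⟩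

lemma dedup_eq (xs : List (List Char)) (hnd : xs.Nodup) (hne : ∀ s ∈ xs, s ≠ []) :
    skUltimaClean xs = xs.filter (fun s => !((skbContained xs).contains s)) := by
  unfold skUltimaClean
  apply List.filter_congr
  intro s hs
  have hsne : s ≠ [] := hne s hs
  have hmid : (s ∈ skbContained xs) ↔ ∃ t ∈ xs, t ≠ s ∧ s <:+: t := by
    rw [mem_skbContained]
    constructor
    · rintro ⟨t, ht, hcase⟩
      have hti : (s <:+: t ∧ s ≠ t) := by
        rw [proper_infix_iff_slices hsne]
        simp only [PySem.List.mem_pyRange_one, PySem.List.len_eq] at hcase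
        rcases hcase with ⟨a, ⟨ha0, haL⟩, b, ⟨hab, hbL⟩, rfl⟩ | ⟨a, ⟨ha1, haL⟩, rfl⟩
        · left
          refine ⟨a.toNat, b.toNat, by omega, by omega, by omega, ?_⟩
          rw [PySem.List.slice_toNat t ha0 (by omega)]
        · right
          refine ⟨a.toNat, by omega, by omega, ?_⟩
          rw [PySem.List.slice_from t (by omega)]
      exact ⟨t, ht, fun h => hti.2 h.symm, hti.1⟩
    · rintro ⟨t, ht, hts, hinf⟩
      refine ⟨t, ht, ?_⟩
      simp only [PySem.List.mem_pyRange_one, PySem.List.len_eq]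
      have := (proper_infix_iff_slices hsne).mp ⟨hinf, fun h => hts h.symm⟩
      rcases this with ⟨a, b, haL, hab, hbL, hy⟩ | ⟨a, ha1, haL, hy⟩
      · left
        refine ⟨(a : Int), ⟨by omega, by omega⟩, (b : Int), ⟨by omega, by omega⟩, ?_⟩
        rw [PySem.List.slice_toNat t (by omega) (by omega)]
        simpa using hy
      · right
        refine ⟨(a : Int), ⟨by omega, by omega⟩, ?_⟩
        rw [PySem.List.slice_from t (by omega)]
        simpa using hy
  have hA : (s ∈ ((PySem.List.pyRange 0 (PySem.List.len xs) 1).foldl (fun td i =>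
      (PySem.List.pyRange 0 (PySem.List.len xs) 1).foldl (fun td j =>
        if i ≠ j ∧ PySem.Chars.isIn (PySem.List.pyGetD xs i [])
            (PySem.List.pyGetD xs j []) = true
        then td.add (PySem.List.pyGetD xs i []) else td) td)
      PySem.Set.empty)) ↔ ∃ t ∈ xs, t ≠ s ∧ s <:+: t := by
    rw [mem_foldl_set _ _ (fun i y => ∃ j ∈ PySem.List.pyRange 0 (PySem.List.len xs) 1,
        (i ≠ j ∧ PySem.Chars.isIn (PySem.List.pyGetD xs i [])
          (PySem.List.pyGetD xs j []) = true) ∧ y = PySem.List.pyGetD xs i [])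
      (fun st i y => mem_cond_add_fold _ _ _ st y)]
    have hemp : s ∈ (PySem.Set.empty : PySem.Set (List Char)) ↔ False := by
      rw [PySem.Set.empty_eq]
      simp
    rw [hemp, false_or]
    simp only [PySem.List.len_eq, PySem.List.mem_pyRange_one]
    constructor
    · rintro ⟨i, ⟨hi0, hiL⟩, j, ⟨hj0, hjL⟩, ⟨hij, hin⟩, hy⟩
      rw [PySem.List.pyGetD_eq_getElem xs [] hi0 hiL] at hy hin
      rw [PySem.List.pyGetD_eq_getElem xs [] hj0 hjL] at hin
      refine ⟨xs[j.toNat], List.getElem_mem _, ?_, ?_⟩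
      · intro heq
        rw [hy] at heq
        have := (hnd.getElem_inj_iff).mp heq
        omega
      · rw [hy]
        exact (PySem.Chars.isIn_iff_infix _ _).mp hin
    · rintro ⟨t, ht, hts, hinf⟩
      obtain ⟨jn, hjn, rfl⟩ := List.mem_iff_getElem.mp ht
      obtain ⟨im, him, hims⟩ := List.mem_iff_getElem.mp hs
      refine ⟨(im : Int), ⟨by omega, by omega⟩, (jn : Int), ⟨by omega, by omega⟩,
        ⟨?_, ?_⟩, ?_⟩
      · intro heq
        have h2 : im = jn := by omega
        apply hts
        rw [← hims]
        simp only [h2]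
      · rw [PySem.List.pyGetD_eq_getElem xs [] (by omega) (by omega),
          PySem.List.pyGetD_eq_getElem xs [] (by omega) (by omega)]
        simp only [Int.toNat_natCast]
        rw [hims]
        exact (PySem.Chars.isIn_iff_infix _ _).mpr hinf
      · rw [PySem.List.pyGetD_eq_getElem xs [] (by omega) (by omega)]
        simp only [Int.toNat_natCast]
        rw [hims]
  rw [Bool.eq_iff_iff]
  simp only [Bool.not_eq_true']
  rw [← not_iff_not]
  simp only [Bool.not_eq_false]
  rw [PySem.Set.contains_iff, PySem.Set.contains_iff, hA, hmid]

-- ---- canonical candidate list ----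
def tripC (j k : Int) : List Char :=
  '0' :: ',' :: (PySem.Int.toChars j ++ ',' :: PySem.Int.toChars k)

def pairC (j : Int) : List Char := '0' :: ',' :: PySem.Int.toChars j

def candsC (N : Int) : List (List Char) :=
  ((PySem.List.pyRange 1 (N - 1) 1).flatMap
    (fun j => (PySem.List.pyRange (j + 1) N 1).map (fun k => tripC j k))) ++
  (if 2 ≤ N then [pairC (N - 1)] else [])

lemma skbCands_eq (N : Int) : skbCands N = candsC N := by
  unfold skbCands candsC
  by_cases h : 2 ≤ N <;>
    simp [h, tripC, pairC, List.flatMap_def]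

lemma tripC_inj {j k j' k' : Int} (hj : 0 ≤ j) (hj' : 0 ≤ j') (hk : 0 ≤ k) (hk' : 0 ≤ k')
    (h : tripC j k = tripC j' k') : j = j' ∧ k = k' := by
  simp only [tripC, List.cons.injEq, true_and] at h
  obtain ⟨h1, h2⟩ := comma_append_inj (comma_not_mem_toChars hj) (comma_not_mem_toChars hj') h
  exact ⟨toChars_inj hj hj' h1, toChars_inj hk hk' h2⟩

lemma pairC_ne_tripC {m j k : Int} (hm : 0 ≤ m) : pairC m ≠ tripC j k := by
  intro h
  simp only [pairC, tripC, List.cons.injEq, true_and] at h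
  exact comma_not_mem_toChars hm (h ▸ List.mem_append_right _ List.mem_cons_self)

lemma flatMap_congr_mem {α β : Type} {l : List α} {f g : α → List β}
    (h : ∀ x ∈ l, f x = g x) : l.flatMap f = l.flatMap g := by
  simp only [List.flatMap_def]
  exact congrArg List.flatten (List.map_congr_left h)

lemma candsC_nodup (N : Int) : (candsC N).Nodup := by
  unfold candsC
  have hmemr : ∀ {j : Int}, j ∈ PySem.List.pyRange 1 (N - 1) 1 → 1 ≤ j ∧ j < N - 1 :=
    fun hj => PySem.List.mem_pyRange_one.mp hj
  apply List.Nodup.append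
  · rw [List.nodup_flatMap]
    constructor
    · intro j hj
      refine List.Nodup.map_on ?_ (PySem.List.nodup_pyRange_one _ _)
      intro k hk k' hk' heq
      have h1 := hmemr hj
      have h2 := PySem.List.mem_pyRange_one.mp hk
      have h3 := PySem.List.mem_pyRange_one.mp hk'
      exact (tripC_inj (by omega) (by omega) (by omega) (by omega) heq).2
    · refine List.Pairwise.imp_of_mem ?_ (PySem.List.pairwise_lt_pyRange_one _ _)
      intro j j' hj hj' hlt z hz hz'
      obtain ⟨k, hk, rfl⟩ := List.mem_map.mp hz
      obtain ⟨k', hk', heq⟩ := List.mem_map.mp hz'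
      have h1 := hmemr hj
      have h2 := hmemr hj'
      have h3 := PySem.List.mem_pyRange_one.mp hk
      have h4 := PySem.List.mem_pyRange_one.mp hk'
      have := (tripC_inj (by omega) (by omega) (by omega) (by omega) heq.symm).1
      omega
  · split_ifs <;> simp
  · intro z hz hz'
    obtain ⟨j, hj, hzz⟩ := List.mem_flatMap.mp hz
    obtain ⟨k, hk, rfl⟩ := List.mem_map.mp hzz
    by_cases h2 : 2 ≤ N
    · rw [if_pos h2] at hz'
      rcases List.mem_singleton.mp hz' with heq
      exact pairC_ne_tripC (by omega) heq.symm
    · rw [if_neg h2] at hz'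
      simp at hz'

lemma candsC_ne_nil (N : Int) : ∀ s ∈ candsC N, s ≠ [] := by
  intro s hsm
  unfold candsC at hsm
  rcases List.mem_append.mp hsm with h | h
  · obtain ⟨j, _, hs⟩ := List.mem_flatMap.mp h
    obtain ⟨k, _, rfl⟩ := List.mem_map.mp hs
    simp [tripC]
  · by_cases h2 : 2 ≤ N
    · rw [if_pos h2] at h
      rcases List.mem_singleton.mp h with rfl
      simp [pairC]
    · rw [if_neg h2] at h
      simp at h

-- ---- the scan of ultima finds exactly the name with the matching root ----
lemma skScan_map (l : List Char) (j : Int) (hj0 : 0 ≤ j) (L : List Int)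
    (hL : ∀ x ∈ L, 0 ≤ x) (hmem : j ∈ L) (g : Int → SkName)
    (hroot : ∀ x, (g x).root = PySem.Int.toChars x) :
    skScan l (PySem.Int.toChars j) (L.map g) =
      (g j).children.map (fun c => l ++ ',' :: c) := by
  induction L with
  | nil => simp at hmem
  | cons x t ih =>
    rw [List.map_cons, skScan]
    by_cases hx : j = x
    · subst hx
      rw [if_pos (by rw [hroot])]
    · rw [if_neg (by
        rw [hroot]
        intro hc
        exact hx (toChars_inj hj0 (hL x List.mem_cons_self) hc))]
      exact ih (fun z hz => hL z (List.mem_cons_of_mem _ hz)) (by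
        rcases List.mem_cons.mp hmem with h | h
        · exact absurd h hx
        · exact h)

-- ---- A's pipeline produces candsC ----
lemma skuldA_eq (input_string : String) (h : input_string ≠ "") :
    skuld input_string =
      ((candsC (PySem.Str.len input_string)).filter
        (fun s => !((skbContained (candsC (PySem.Str.len input_string))).contains s))).map
        String.ofList := by
  have htl : input_string.toList ≠ [] := fun hc => h (String.toList_eq_nil_iff.mp hc)
  set N := PySem.Str.len input_string with hN
  have hlen : N = (input_string.toList.length : Int) := PySem.Str.len_eq input_string
  have hN1 : 1 ≤ N := by
    have := List.length_pos_iff.mpr htl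
    omega
  have hnames : skBuildDict input_string =
      (PySem.List.pyRange 0 N 1).map (fun i => SkName.mk (PySem.Int.toChars i)
        ((PySem.List.pyRange (i + 1) N 1).map PySem.Int.toChars)) := rfl
  have hsl : (skBuildDict input_string).foldl (fun acc name =>
      acc ++ name.children.map (fun child => name.root ++ ',' :: child)) [] =
      (PySem.List.pyRange 0 N 1).flatMap (fun i => (PySem.List.pyRange (i + 1) N 1).map
        (fun j => PySem.Int.toChars i ++ ',' :: PySem.Int.toChars j)) := by
    rw [hnames, PySem.List.foldl_append_eq_flatMap, List.nil_append, List.flatMap_map]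
    refine flatMap_congr_mem (fun i _ => ?_)
    simp [List.map_map, Function.comp]
  have hrange : PySem.List.pyRange 0 N 1 = PySem.List.pyRange 0 (N - 1) 1 ++ [N - 1] := by
    have h2 := PySem.List.pyRange_one_succ_right (a := 0) (b := N - 1) (by omega)
    have h3 : N - 1 + 1 = N := by omega
    rw [h3] at h2
    exact h2
  have hlast : PySem.List.pyGet? (skBuildDict input_string) (-1) =
      some (SkName.mk (PySem.Int.toChars (N - 1))
        ((PySem.List.pyRange ((N - 1) + 1) N 1).map PySem.Int.toChars)) := by
    rw [hnames, PySem.List.pyGet?_neg_one, hrange, List.map_append, List.map_singleton,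
      List.getLast?_concat]
  unfold skuld skUltima
  rw [hsl, hlast, Option.elim_some]
  -- the loop of ultima as a flatMap
  set names := skBuildDict input_string with hnms
  set G : List Char → List (List Char) := fun l =>
    if skRsplitLast l = PySem.Int.toChars (N - 1) then [l]
    else skScan l (skRsplitLast l) names with hG
  have hbody : (fun (acc : List (List Char)) l =>
      if skRsplitLast l = (SkName.mk (PySem.Int.toChars (N - 1))
          ((PySem.List.pyRange ((N - 1) + 1) N 1).map PySem.Int.toChars)).root
      then acc ++ [l] else acc ++ skScan l (skRsplitLast l) names) =
      (fun acc l => acc ++ G l) := by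
    funext acc l
    rw [hG]
    by_cases hc : skRsplitLast l = PySem.Int.toChars (N - 1) <;> simp [hc]
  rw [hbody, PySem.List.foldl_append_eq_flatMap, List.nil_append, List.flatMap_assoc]
  -- evaluate G on each generated pair
  have hG2 : ∀ i j : Int, 0 ≤ i → i < j → j < N →
      G (PySem.Int.toChars i ++ ',' :: PySem.Int.toChars j) =
        (if j = N - 1 then [PySem.Int.toChars i ++ ',' :: PySem.Int.toChars j]
         else (PySem.List.pyRange (j + 1) N 1).map
           (fun k => (PySem.Int.toChars i ++ ',' :: PySem.Int.toChars j) ++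
             ',' :: PySem.Int.toChars k)) := by
    intro i j hi hij hjN
    rw [hG]
    simp only []
    rw [skRsplitLast_append (comma_not_mem_toChars (show (0:Int) ≤ j by omega))]
    by_cases hj : j = N - 1
    · rw [if_pos (by rw [hj]), if_pos hj]
    · rw [if_neg (fun hc => hj (toChars_inj (by omega) (by omega) hc)), if_neg hj, hnames]
      rw [skScan_map _ j (by omega) _
        (fun x hx => (PySem.List.mem_pyRange_one.mp hx).1)
        (PySem.List.mem_pyRange_one.mpr ⟨by omega, hjN⟩) _ (fun x => rfl)]
      simp [List.map_map, Function.comp]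
  -- push the zero-digit filter through
  unfold skCleanList
  simp only [List.filter_flatMap]
  have hp0 : ∀ (i : Int) (rest : List Char), 0 ≤ i →
      ((PySem.List.pyGet? (PySem.Int.toChars i ++ rest) 0 == some '0') = true ↔ i = 0) := by
    intro i rest hi
    obtain ⟨c, cs, hc⟩ := List.exists_cons_of_ne_nil (toChars_ne_nil i)
    rw [PySem.List.pyGet?_zero, hc, List.cons_append, List.getElem?_cons_zero, beq_iff_eq,
      ← head?_toChars_zero_iff hi, hc]
    simp
  have hrow : ∀ i ∈ PySem.List.pyRange 0 N 1,
      ((PySem.List.pyRange (i + 1) N 1).map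
        (fun j => PySem.Int.toChars i ++ ',' :: PySem.Int.toChars j)).flatMap
        (fun l => List.filter (fun l => PySem.List.pyGet? l 0 == some '0') (G l)) =
      (if i = 0 then
        (PySem.List.pyRange (i + 1) N 1).flatMap (fun j =>
          if j = N - 1 then [PySem.Int.toChars i ++ ',' :: PySem.Int.toChars j]
          else (PySem.List.pyRange (j + 1) N 1).map
            (fun k => (PySem.Int.toChars i ++ ',' :: PySem.Int.toChars j) ++
              ',' :: PySem.Int.toChars k))
       else []) := by
    intro i hi
    obtain ⟨hi0, hiN⟩ := PySem.List.mem_pyRange_one.mp hi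
    rw [List.flatMap_map (l := PySem.List.pyRange (i + 1) N 1)
      (f := fun j => PySem.Int.toChars i ++ ',' :: PySem.Int.toChars j)]
    by_cases hz : i = 0
    · rw [if_pos hz]
      refine flatMap_congr_mem (l := PySem.List.pyRange (i + 1) N 1) (fun j hj => ?_)
      have hj' : j ∈ PySem.List.pyRange (i + 1) N 1 := hj
      obtain ⟨hj1, hjN⟩ := PySem.List.mem_pyRange_one.mp hj'
      rw [hG2 i j hi0 (by omega) hjN]
      by_cases hjn : j = N - 1
      · rw [if_pos hjn, List.filter_cons, if_pos ((hp0 i _ hi0).mpr hz), List.filter_nil]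
      · rw [if_neg hjn]
        refine List.filter_eq_self.mpr (fun l hl => ?_)
        obtain ⟨k, hk, rfl⟩ := List.mem_map.mp hl
        rw [List.append_assoc, List.cons_append]
        exact (hp0 i _ hi0).mpr hz
    · rw [if_neg hz]
      refine List.flatMap_eq_nil_iff.mpr (fun j hj => ?_)
      have hj' : j ∈ PySem.List.pyRange (i + 1) N 1 := hj
      obtain ⟨hj1, hjN⟩ := PySem.List.mem_pyRange_one.mp hj'
      rw [hG2 i j hi0 (by omega) hjN]
      by_cases hjn : j = N - 1
      · rw [if_pos hjn, List.filter_cons,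
          if_neg (fun hc => hz ((hp0 i _ hi0).mp hc)), List.filter_nil]
      · rw [if_neg hjn]
        refine List.filter_eq_nil_iff.mpr (fun l hl => ?_)
        obtain ⟨k, hk, rfl⟩ := List.mem_map.mp hl
        rw [List.append_assoc, List.cons_append]
        intro hc
        exact hz ((hp0 i _ hi0).mp hc)
  rw [flatMap_congr_mem hrow]
  -- only the first row survives
  have hcons : PySem.List.pyRange 0 N 1 = 0 :: PySem.List.pyRange 1 N 1 :=
    PySem.List.pyRange_one_cons (by omega)
  rw [hcons, List.flatMap_cons, if_pos rfl]
  have hrest : (PySem.List.pyRange 1 N 1).flatMap (fun i =>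
      if i = 0 then
        (PySem.List.pyRange (i + 1) N 1).flatMap (fun j =>
          if j = N - 1 then [PySem.Int.toChars i ++ ',' :: PySem.Int.toChars j]
          else (PySem.List.pyRange (j + 1) N 1).map
            (fun k => (PySem.Int.toChars i ++ ',' :: PySem.Int.toChars j) ++
              ',' :: PySem.Int.toChars k))
      else []) = [] := by
    refine List.flatMap_eq_nil_iff.mpr (fun i hi => ?_)
    obtain ⟨hi1, _⟩ := PySem.List.mem_pyRange_one.mp hi
    rw [if_neg (by omega)]
  rw [hrest, List.append_nil]
  -- the first row is candsC N
  have hrow0 : (PySem.List.pyRange (0 + 1) N 1).flatMap (fun j =>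
      if j = N - 1 then [PySem.Int.toChars 0 ++ ',' :: PySem.Int.toChars j]
      else (PySem.List.pyRange (j + 1) N 1).map
        (fun k => (PySem.Int.toChars 0 ++ ',' :: PySem.Int.toChars j) ++
          ',' :: PySem.Int.toChars k)) = candsC N := by
    unfold candsC
    by_cases h2 : 2 ≤ N
    · have hb : PySem.List.pyRange (N - 1) N 1 = [N - 1] := by
        have hsing := PySem.List.pyRange_one_singleton (N - 1)
        rw [show N - 1 + 1 = N by omega] at hsing
        exact hsing
      have hsplit : PySem.List.pyRange (0 + 1) N 1 =
          PySem.List.pyRange 1 (N - 1) 1 ++ [N - 1] := by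
        rw [show (0:Int) + 1 = 1 by norm_num]
        rw [PySem.List.pyRange_one_append 1 (N - 1) N (by omega) (by omega), hb]
      rw [if_pos h2, hsplit, List.flatMap_append]
      congr 1
      · refine flatMap_congr_mem (fun j hj => ?_)
        have hj' : j ∈ PySem.List.pyRange 1 (N - 1) 1 := hj
        obtain ⟨hj1, hjN⟩ := PySem.List.mem_pyRange_one.mp hj'
        rw [if_neg (by omega)]
        refine List.map_congr_left (fun k hk => ?_)
        simp [tripC, toChars_zero]
      · simp [pairC, toChars_zero]
    · have hN1' : N = 1 := by omega
      rw [if_neg h2, hN1']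
      rfl
  rw [hrow0]
  -- finally the dedup stage
  rw [dedup_eq _ (candsC_nodup N) (candsC_ne_nil N)]

-- ===== VERDICT (by name: the statement is the Claim_ definition above) =====
theorem skuld_spec : Claim_equal_skuld := by
  intro input_string _ hpre
  unfold Spec_skuld skuld_alt
  rw [skuldA_eq input_string hpre, skbCands_eq]

@[simp] theorem skuld_raises : Claim_raises_skuld := by
  unfold Claim_raises_skuld
  exact ⟨fun s _ hr hp => hp hr, by decide⟩
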